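-- pv_equiv track=rewrite | github.com/alsosprachben/jsmx | scripts/gen_unicode_derived_normalization_props.py | flatten_mappings
-- ===== SOURCE A (Python) =====
-- from typing import Dict, List, Tuple
--
-- def flatten_mappings(maps: List[Tuple[int, List[int]]]):
--     maps.sort(key=lambda m: m[0])
--     data: List[int] = []
--     table: List[Tuple[int, int, int]] = []
--     for cp, seq in maps:
--         idx = len(data)
--         data.extend(seq)
--         table.append((cp, idx, len(seq)))
--     return table, data
-- ===== SOURCE B (Python) =====
-- def flatten_mappings(maps):
--     maps.sort(key=lambda m: m[0])
--     data = [x for _, seq in maps for x in seq]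
--     lens = [len(seq) for _, seq in maps]
--     offsets = [0]
--     for n in lens:
--         offsets.append(offsets[-1] + n)
--     table = [(cp, off, n) for (cp, _), off, n in zip(maps, offsets, lens)]
--     return table, data
-- ===== Notes on version B (the rewrite author's own statement) =====
-- stated objective: alternative
-- what changed: Replaces A's single fused loop that tracks len(data) while appending to both lists with separate passes: flatten all sequences with a comprehension, take the lengths, build the offsets as a prefix sum, and zip the three together into the table.
import Mathlib
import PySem

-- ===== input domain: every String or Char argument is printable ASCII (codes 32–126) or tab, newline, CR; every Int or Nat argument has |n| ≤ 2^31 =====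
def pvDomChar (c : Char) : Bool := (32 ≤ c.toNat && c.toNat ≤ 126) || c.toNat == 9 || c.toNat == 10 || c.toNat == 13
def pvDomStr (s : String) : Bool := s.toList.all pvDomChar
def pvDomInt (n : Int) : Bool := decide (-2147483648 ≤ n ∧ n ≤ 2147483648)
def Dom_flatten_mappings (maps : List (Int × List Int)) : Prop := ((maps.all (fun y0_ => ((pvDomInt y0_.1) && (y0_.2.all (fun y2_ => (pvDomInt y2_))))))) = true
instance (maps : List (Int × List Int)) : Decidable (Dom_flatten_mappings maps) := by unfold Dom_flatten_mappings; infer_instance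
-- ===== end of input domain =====

-- B replaces A's fused index-tracking loop by separate flatten / prefix-sum / zip passes ('alternative',
-- same cost). Both Pythons sort `maps` in place (observable mutation, identical in A and B); the
-- equivalence proved here is about the return value.

-- ===== PORT A =====
-- A: sort, then one loop appending to data and table, table entry uses len(data) before the extend.
def flatten_mappings (maps : List (Int × List Int)) : (List (Int × Int × Int)) × List Int :=
  let s := PySem.List.sorted maps (fun m => m.1)
  let st := s.foldl
    (fun (st : List Int × List (Int × Int × Int)) m =>
      (st.1 ++ m.2, st.2 ++ [(m.1, (st.1.length : Int), (m.2.length : Int))]))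
    ([], [])
  (st.2, st.1)

-- ===== PORT B =====
-- B: sort, flatten, lengths, prefix-sum offsets (offsets[-1] on an always-nonempty list = getLastD 0),
-- then zip maps/offsets/lens into the table (zip truncates like Python's).
def flatten_mappings_alt (maps : List (Int × List Int)) : (List (Int × Int × Int)) × List Int :=
  let s := PySem.List.sorted maps (fun m => m.1)
  let data := s.flatMap (fun m => m.2)
  let lens := s.map (fun m => (m.2.length : Int))
  let offsets := lens.foldl (fun acc n => acc ++ [acc.getLastD 0 + n]) [0]
  let table := (s.zip (offsets.zip lens)).map (fun p => (p.1.1, p.2.1, p.2.2))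
  (table, data)

-- ===== PRECONDITION & SPEC =====
def Spec_flatten_mappings (maps : List (Int × List Int)) (out : (List (Int × Int × Int)) × List Int) : Prop := out = flatten_mappings_alt maps
instance (maps : List (Int × List Int)) (out : (List (Int × Int × Int)) × List Int) : Decidable (Spec_flatten_mappings maps out) := by unfold Spec_flatten_mappings; infer_instance

-- ===== CLAIM (what is proved, stated in full; the proofs are below) =====
def Claim_equal_flatten_mappings : Prop := ∀ (maps : List (Int × List Int)), Dom_flatten_mappings maps → Spec_flatten_mappings maps (flatten_mappings maps)

-- ===== LEMMAS AND PROOFS =====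

-- B's offsets loop is scanl (+): appending `last + n` to a nonempty accumulator.
theorem offsets_foldl (lens : List Int) (pre : List Int) (a : Int) :
    lens.foldl (fun acc n => acc ++ [acc.getLastD 0 + n]) (pre ++ [a]) =
      pre ++ List.scanl (· + ·) a lens := by
  induction lens generalizing pre a with
  | nil => simp
  | cons n rest ih =>
    simp only [List.foldl_cons, List.scanl_cons]
    have h : (pre ++ [a]).getLastD 0 = a := by simp
    rw [h, ih (pre ++ [a]) (a + n)]
    simp

-- A's fused loop, characterised against B's three passes, generalizing the accumulators.
theorem loop_eq (s : List (Int × List Int)) (d : List Int) (t : List (Int × Int × Int)) :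
    s.foldl
      (fun (st : List Int × List (Int × Int × Int)) m =>
        (st.1 ++ m.2, st.2 ++ [(m.1, (st.1.length : Int), (m.2.length : Int))]))
      (d, t) =
    (d ++ s.flatMap (fun m => m.2),
     t ++ (s.zip ((List.scanl (· + ·) (d.length : Int) (s.map (fun m => (m.2.length : Int)))).zip
              (s.map (fun m => (m.2.length : Int))))).map (fun p => (p.1.1, p.2.1, p.2.2))) := by
  induction s generalizing d t with
  | nil => simp
  | cons m rest ih =>
    simp only [List.foldl_cons, List.map_cons, List.scanl_cons, List.zip_cons_cons,
      List.flatMap_cons]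
    rw [ih]
    have hlen : ((d ++ m.2).length : Int) = (d.length : Int) + (m.2.length : Int) := by
      simp [List.length_append]
    rw [hlen]
    simp [List.append_assoc]

-- ===== VERDICT (by name: the statement is the Claim_ definition above) =====
theorem flatten_mappings_spec : Claim_equal_flatten_mappings := by
  intro maps _
  show flatten_mappings maps = flatten_mappings_alt maps
  simp only [flatten_mappings, flatten_mappings_alt]
  rw [loop_eq]
  have := offsets_foldl ((PySem.List.sorted maps (fun m => m.1)).map (fun m => (m.2.length : Int))) [] 0
  simp only [List.nil_append] at this
  rw [this]
  simp
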